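-- pv_equiv track=rewrite | github.com/SestrenExsis/CodeKatas | adventofcode/AdventOfCode2021.py | solve
-- ===== SOURCE A (Python) =====
-- def solve(parsed_input):
--     N = len(parsed_input)
--     counts = [0] * len(parsed_input[0])
--     for line in parsed_input:
--         for i, char in enumerate(line):
--             if char == '1':
--                 counts[i] += 1
--     gamma_chars = []
--     epsilon_chars = []
--     for i, count in enumerate(counts):
--         if count >= N // 2:
--             gamma_chars.append('1')
--             epsilon_chars.append('0')
--         else:
--             gamma_chars.append('0')
--             epsilon_chars.append('1')
--     gamma = int(''.join(gamma_chars), 2)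
--     epsilon = int(''.join(epsilon_chars), 2)
--     power = gamma * epsilon
--     result = power
--     return result
-- ===== SOURCE B (Python) =====
-- def solve(parsed_input):
--     N = len(parsed_input)
--     W = len(parsed_input[0])
--     base = N + 1  # per-column one-counts are at most N, so base-(N+1) digits never carry
--     packed = 0
--     for line in parsed_input:
--         row = line[:W]
--         v = 0
--         for c in row:
--             v = v * base + (1 if c == '1' else 0)
--         packed += v * base ** (W - len(row))
--     half = N // 2
--     gamma = 0
--     weight = 1
--     for _ in range(W):
--         if packed % base >= half:
--             gamma += weight
--         weight *= 2
--         packed //= base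
--     return gamma * ((1 << W) - 1 - gamma)
-- ===== Notes on version B (the rewrite author's own statement) =====
-- stated objective: alternative
-- what changed: B replaces A's counts list entirely: it packs all W column one-counts into a single big integer in base N+1 (one carry-free addition per row), then peels that integer apart digit by digit with divmod, building gamma from the least-significant column up by adding powers of two, and gets epsilon as the closed-form W-bit complement instead of a parallel bit string.
import Mathlib
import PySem

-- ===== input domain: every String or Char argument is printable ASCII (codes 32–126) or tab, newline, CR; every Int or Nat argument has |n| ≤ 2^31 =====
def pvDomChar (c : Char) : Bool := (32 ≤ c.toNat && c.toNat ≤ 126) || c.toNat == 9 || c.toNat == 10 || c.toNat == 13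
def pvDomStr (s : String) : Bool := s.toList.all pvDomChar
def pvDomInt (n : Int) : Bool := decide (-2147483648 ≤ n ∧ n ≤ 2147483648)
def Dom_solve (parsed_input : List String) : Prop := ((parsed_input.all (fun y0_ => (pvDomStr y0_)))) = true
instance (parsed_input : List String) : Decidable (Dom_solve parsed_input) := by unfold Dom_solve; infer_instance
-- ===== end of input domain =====

-- B abandons A's counts list: it packs all column one-counts into one base-(N+1) integer
-- (one carry-free addition per row), then peels digits off with divmod to build gamma
-- from the least-significant column up, taking epsilon as the W-bit complement (objective: alternative).


-- ===== PORT A =====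
-- inner `for i, char in enumerate(line): if char == '1': counts[i] += 1` as the lockstep
-- structural recursion over the same state (exact when no '1' occurs past len(counts); a '1'
-- beyond makes Python raise IndexError, which Pre_solve excludes)
def updRow : List Int → List Char → List Int
  | cs, [] => cs
  | [], _ => []
  | c :: cs, ch :: ln => (if ch = '1' then c + 1 else c) :: updRow cs ln

-- hand port of int(''.join(chars), 2): exact for nonempty lists of '0'/'1' characters, the only
-- lists A feeds it inside Pre_solve (the empty list, a ValueError in Python, is excluded)
def binVal (chars : List Char) : Int :=
  chars.foldl (fun a ch => 2 * a + (if ch = '1' then 1 else 0)) 0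

def solve (parsed_input : List String) : Int :=
  let lines := parsed_input.map String.toList
  let N : Int := (parsed_input.length : Int)
  let counts : List Int := lines.foldl updRow (List.replicate lines.headI.length 0)
  let gamma_chars := counts.map (fun c => if c ≥ PySem.Int.floordiv N 2 then '1' else '0')
  let epsilon_chars := counts.map (fun c => if c ≥ PySem.Int.floordiv N 2 then '0' else '1')
  let gamma := binVal gamma_chars
  let epsilon := binVal epsilon_chars
  let power := gamma * epsilon
  power

-- ===== PORT B =====
def solve_alt (parsed_input : List String) : Int :=
  let lines := parsed_input.map String.toList
  let N : Int := (parsed_input.length : Int)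
  let W : Nat := lines.headI.length
  let base : Int := N + 1
  -- packed += v * base ** (W - len(row)) with v the base-`base` value of row = line[:W]
  -- (line[:W] with W ≥ 0 is List.take W; exponent W - len(row) is the same Nat subtraction)
  let packed : Int := lines.foldl (fun p line =>
    let row := line.take W
    let v := row.foldl (fun v c => v * base + (if c = '1' then 1 else 0)) 0
    p + v * base ^ (W - row.length)) 0
  let half := PySem.Int.floordiv N 2
  -- for _ in range(W): if packed % base >= half: gamma += weight; weight *= 2; packed //= base
  let s := (List.range W).foldl (fun (s : Int × Int × Int) _ =>
    let (gamma, weight, packed) := s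
    ((if PySem.Int.mod packed base ≥ half then gamma + weight else gamma),
      weight * 2, PySem.Int.floordiv packed base)) (0, 1, packed)
  s.1 * ((2 ^ W : Int) - 1 - s.1)   -- (1 << W) - 1 - gamma

-- ===== PRECONDITION & SPEC =====
-- Pre_ excludes exactly the inputs where A raises: the empty list (IndexError on parsed_input[0]),
-- an empty first line (ValueError in int('', 2)), and a '1' beyond the first line's width (IndexError on counts[i]).
def Pre_solve (parsed_input : List String) : Prop :=
  parsed_input ≠ [] ∧ 0 < parsed_input.headI.toList.length ∧
    (parsed_input.all
      (fun s => (s.toList.drop parsed_input.headI.toList.length).all (fun c => c ≠ '1'))) = true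
instance (parsed_input : List String) : Decidable (Pre_solve parsed_input) := by
  unfold Pre_solve; infer_instance
def pvWitness_solve : List String := ["10", "01", "11"]
def Spec_solve (parsed_input : List String) (out : Int) : Prop := out = solve_alt parsed_input
instance (parsed_input : List String) (out : Int) : Decidable (Spec_solve parsed_input out) := by
  unfold Spec_solve; infer_instance

-- ===== CLAIM (what is proved, stated in full; the proofs are below) =====
def Claim_equal_solve : Prop := ∀ (parsed_input : List String), Dom_solve parsed_input →
  Pre_solve parsed_input → Spec_solve parsed_input (solve parsed_input)

-- ===== LEMMAS AND PROOFS =====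

-- big-endian base-b value of a digit list, and the same read from a reversed (LSB-first) list
def encB (b : Int) (cs : List Int) : Int := cs.foldl (fun a d => a * b + d) 0
def encR (b : Int) (ds : List Int) : Int := ds.foldr (fun d a => a * b + d) 0
-- little-endian binary value of a 0/1 list
def valLE (bs : List Int) : Int := bs.foldr (fun x a => x + 2 * a) 0
def indC (c : Char) : Int := if c = '1' then 1 else 0

theorem foldl_mulbase_shift (b : Int) (cs : List Int) : ∀ a : Int,
    cs.foldl (fun x d => x * b + d) a = a * b ^ cs.length + cs.foldl (fun x d => x * b + d) 0 := by
  induction cs with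
  | nil => intro a; simp
  | cons c cs ih =>
    intro a
    simp only [List.foldl_cons, List.length_cons]
    rw [ih (a * b + c), ih (0 * b + c)]
    ring

theorem encB_cons (b x : Int) (xs : List Int) :
    encB b (x :: xs) = x * b ^ xs.length + encB b xs := by
  unfold encB
  simp only [List.foldl_cons]
  rw [foldl_mulbase_shift b xs (0 * b + x)]
  ring

theorem encB_reverse (b : Int) (cs : List Int) : encR b cs.reverse = encB b cs := by
  unfold encR encB
  rw [List.foldr_reverse]

theorem encB_replicate_zero (b : Int) (n : Nat) : encB b (List.replicate n 0) = 0 := by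
  induction n with
  | zero => rfl
  | succ n ih => rw [List.replicate_succ, encB_cons, ih]; ring

theorem updRow_length (cs : List Int) (ln : List Char) :
    (updRow cs ln).length = cs.length := by
  induction cs generalizing ln with
  | nil => cases ln with
    | nil => rfl
    | cons ch l => rfl
  | cons c cs ih => cases ln with
    | nil => rfl
    | cons ch l => simp only [updRow, List.length_cons]; rw [ih l]

theorem updRow_take (cs : List Int) (ln : List Char) :
    updRow cs ln = updRow cs (ln.take cs.length) := by
  induction cs generalizing ln with
  | nil => cases ln <;> rfl
  | cons c cs ih => cases ln with
    | nil => rfl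
    | cons ch l => simp only [updRow, List.length_cons, List.take_succ_cons]; rw [ih l]

theorem updRow_getD (cs : List Int) (ln : List Char) (i : Nat) (hi : i < cs.length) :
    (updRow cs ln).getD i 0 =
      cs.getD i 0 + (if ln[i]? = some '1' then (1 : Int) else 0) := by
  induction cs generalizing ln i with
  | nil => simp at hi
  | cons c cs ih =>
    cases ln with
    | nil => simp [updRow]
    | cons ch l =>
      cases i with
      | zero => simp only [updRow, List.getD_cons_zero, List.getElem?_cons_zero]
                split_ifs <;> simp_all
      | succ i => simpa [updRow] using ih l i (by simpa using hi)

theorem encB_updRow (b : Int) (cs : List Int) (ln : List Char) (h : ln.length ≤ cs.length) :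
    encB b (updRow cs ln) =
      encB b cs + encB b (ln.map indC) * b ^ (cs.length - ln.length) := by
  induction cs generalizing ln with
  | nil =>
    have : ln = [] := by cases ln <;> simp_all
    subst this; simp [updRow, encB]
  | cons c cs ih =>
    cases ln with
    | nil => simp [updRow, encB]
    | cons ch l =>
      simp only [updRow, List.map_cons, List.length_cons]
      rw [encB_cons b _ (updRow cs l), updRow_length cs l,
          encB_cons b c cs, encB_cons b (indC ch) (l.map indC),
          ih l (by simpa using h), List.length_map]
      have hl : l.length ≤ cs.length := by simpa using h
      have hpow : (b : Int) ^ l.length * b ^ (cs.length - l.length) = b ^ cs.length := by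
        rw [← pow_add, Nat.add_sub_cancel' hl]
      have hsub : cs.length + 1 - (l.length + 1) = cs.length - l.length := by omega
      rw [hsub]
      unfold indC
      split_ifs <;> nlinarith [hpow]

theorem packed_eq_encB (b : Int) (W : Nat) (lines : List (List Char)) : ∀ cs : List Int,
    cs.length = W →
    lines.foldl (fun p line =>
      p + (line.take W).foldl (fun v c => v * b + (if c = '1' then 1 else 0)) 0
            * b ^ (W - (line.take W).length)) (encB b cs)
      = encB b (lines.foldl updRow cs) := by
  induction lines with
  | nil => intro cs h; simp
  | cons ln rest ih =>
    intro cs h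
    simp only [List.foldl_cons]
    have hrow : (ln.take W).foldl (fun v c => v * b + (if c = '1' then 1 else 0)) 0
        = encB b ((ln.take W).map indC) := by
      unfold encB
      rw [List.foldl_map]
      rfl
    have htake : updRow cs ln = updRow cs (ln.take W) := by
      rw [updRow_take cs ln, h]
    have hlen : (ln.take W).length ≤ cs.length := by
      simp [h]
    have key : encB b cs + (ln.take W).foldl (fun v c => v * b + (if c = '1' then 1 else 0)) 0
          * b ^ (W - (ln.take W).length) = encB b (updRow cs ln) := by
      rw [hrow, htake, encB_updRow b cs (ln.take W) hlen, h]
    rw [key, ih (updRow cs ln) (by rw [updRow_length, h])]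

theorem foldl_ind_shift (i : Nat) (xs : List (List Char)) : ∀ b : Int,
    xs.foldl (fun s l => s + (if l[i]? = some '1' then (1 : Int) else 0)) b
      = b + xs.foldl (fun s l => s + (if l[i]? = some '1' then (1 : Int) else 0)) 0 := by
  induction xs with
  | nil => intro b; simp
  | cons x xs ih =>
    intro b
    simp only [List.foldl_cons]
    rw [ih (b + (if x[i]? = some '1' then (1 : Int) else 0)),
        ih (0 + (if x[i]? = some '1' then (1 : Int) else 0))]
    ring

theorem colsum_bounds (i : Nat) (xs : List (List Char)) :
    0 ≤ xs.foldl (fun s l => s + (if l[i]? = some '1' then (1 : Int) else 0)) 0 ∧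
      xs.foldl (fun s l => s + (if l[i]? = some '1' then (1 : Int) else 0)) 0 ≤ xs.length := by
  induction xs with
  | nil => simp
  | cons x xs ih =>
    simp only [List.foldl_cons, List.length_cons]
    rw [foldl_ind_shift i xs (0 + (if x[i]? = some '1' then (1 : Int) else 0))]
    obtain ⟨h0, h1⟩ := ih
    constructor <;> split_ifs <;> push_cast <;> omega

theorem foldl_updRow_length (lines : List (List Char)) (cs : List Int) :
    (lines.foldl updRow cs).length = cs.length := by
  induction lines generalizing cs with
  | nil => rfl
  | cons ln rest ih =>
    simp only [List.foldl_cons]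
    rw [ih (updRow cs ln), updRow_length cs ln]

theorem foldl_updRow_getD (lines : List (List Char)) (cs : List Int) (i : Nat)
    (hi : i < cs.length) :
    (lines.foldl updRow cs).getD i 0 =
      cs.getD i 0 +
        lines.foldl (fun s l => s + (if l[i]? = some '1' then (1 : Int) else 0)) 0 := by
  induction lines generalizing cs with
  | nil => simp
  | cons ln rest ih =>
    simp only [List.foldl_cons]
    rw [ih (updRow cs ln) ((updRow_length cs ln).symm ▸ hi),
        updRow_getD cs ln i hi,
        foldl_ind_shift i rest (0 + (if ln[i]? = some '1' then (1 : Int) else 0))]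
    ring

-- extraction: peeling LSB-first digits off encR with %, // recovers the binary value of the bits
theorem valLE_cons (x : Int) (bs : List Int) : valLE (x :: bs) = x + 2 * valLE bs := rfl

theorem extract_digits (b half : Int) (hb : 0 < b) (ds : List Int)
    (hd : ∀ d ∈ ds, 0 ≤ d ∧ d < b) : ∀ g w : Int,
    (List.range ds.length).foldl (fun (s : Int × Int × Int) (_ : Nat) =>
        ((if PySem.Int.mod s.2.2 b ≥ half then s.1 + s.2.1 else s.1),
          s.2.1 * 2, PySem.Int.floordiv s.2.2 b)) (g, w, encR b ds)
      = (g + w * valLE (ds.map (fun d => if d ≥ half then (1 : Int) else 0)),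
          w * 2 ^ ds.length, 0) := by
  induction ds with
  | nil => intro g w; simp [valLE, encR]
  | cons d ds ih =>
    intro g w
    obtain ⟨hd0, hd1⟩ := hd d (by simp)
    have hrest : ∀ d ∈ ds, 0 ≤ d ∧ d < b := fun x hx => hd x (by simp [hx])
    simp only [List.length_cons, List.range_succ_eq_map, List.foldl_cons, List.foldl_map]
    have hmod : PySem.Int.mod (encR b (d :: ds)) b = d := by
      rw [PySem.Int.mod_eq_emod_of_pos hb]
      show (encR b ds * b + d) % b = d
      rw [Int.add_comm, Int.mul_comm, Int.add_mul_emod_self_left, Int.emod_eq_of_lt hd0 hd1]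
    have hdiv : PySem.Int.floordiv (encR b (d :: ds)) b = encR b ds := by
      rw [PySem.Int.floordiv_eq_ediv_of_pos hb]
      show (encR b ds * b + d) / b = encR b ds
      rw [Int.add_comm, Int.add_mul_ediv_right _ _ (by omega : b ≠ 0),
          Int.ediv_eq_zero_of_lt hd0 hd1]
      ring
    rw [hmod, hdiv, ih hrest (if d ≥ half then g + w else g) (w * 2)]
    simp only [List.map_cons, valLE_cons]
    split_ifs <;> simp only [Prod.mk.injEq] <;> refine ⟨by ring, by ring, trivial⟩

theorem valLE_shift (bs : List Int) : ∀ a : Int,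
    bs.foldr (fun x acc => x + 2 * acc) a = valLE bs + a * 2 ^ bs.length := by
  induction bs with
  | nil => intro a; simp [valLE]
  | cons x bs ih =>
    intro a
    simp only [List.foldr_cons, valLE_cons, List.length_cons]
    rw [ih a]
    ring

theorem valLE_append_singleton (bs : List Int) (x : Int) :
    valLE (bs ++ [x]) = valLE bs + x * 2 ^ bs.length := by
  unfold valLE
  rw [List.foldr_append]
  show List.foldr (fun x a => x + 2 * a) (x + 2 * 0) bs = _
  rw [valLE_shift bs (x + 2 * 0)]
  unfold valLE
  ring

theorem foldl_two_eq_valLE_reverse (bs : List Int) : ∀ a : Int,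
    bs.foldl (fun x d => 2 * x + d) a = a * 2 ^ bs.length + valLE bs.reverse := by
  induction bs with
  | nil => intro a; simp [valLE]
  | cons x bs ih =>
    intro a
    simp only [List.foldl_cons, List.length_cons, List.reverse_cons]
    rw [ih (2 * a + x), valLE_append_singleton, List.length_reverse]
    ring

-- ===== VERDICT (by name: the statement is the Claim_ definition above) =====
theorem solve_spec : Claim_equal_solve := by
  intro parsed_input _ hpre
  unfold Spec_solve
  obtain ⟨hne, hw, _⟩ := hpre
  simp only [solve, solve_alt]
  set lines := parsed_input.map String.toList with hlines
  set N : Int := (parsed_input.length : Int) with hN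
  set W : Nat := lines.headI.length with hW
  set base : Int := N + 1 with hbase
  set t : Int := PySem.Int.floordiv N 2 with ht
  set counts : List Int := lines.foldl updRow (List.replicate W 0) with hcounts
  have hNpos : 0 < (parsed_input.length : Int) := by
    cases parsed_input with
    | nil => exact absurd rfl hne
    | cons a l => simp
  have hbpos : 0 < base := by rw [hbase, hN]; omega
  have hclen : counts.length = W := by
    rw [hcounts, foldl_updRow_length lines _]; simp
  have hlineslen : (lines.length : Int) = N := by simp [hlines, hN]
  -- every count lies in [0, N] ⊂ [0, base)
  have hbound : ∀ d ∈ counts, 0 ≤ d ∧ d < base := by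
    intro d hd
    obtain ⟨i, hi, hdi⟩ := List.mem_iff_getElem.mp hd
    have := foldl_updRow_getD lines (List.replicate W 0) i (by simpa using hi.trans_eq hclen)
    rw [← hcounts, List.getD_eq_getElem counts 0 hi, hdi] at this
    obtain ⟨h0, h1⟩ := colsum_bounds i lines
    rw [show (List.replicate W (0:Int)).getD i 0 = 0 by simp [List.getD], zero_add] at this
    refine ⟨by rw [this]; exact h0, ?_⟩
    rw [this, hbase]
    linarith [h1, hlineslen.le, hlineslen.ge]
  -- B's packed is the base-(N+1) encoding of A's counts
  have hpacked : lines.foldl (fun p line =>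
      p + (line.take W).foldl (fun v c => v * base + (if c = '1' then 1 else 0)) 0
        * base ^ (W - (line.take W).length)) 0 = encB base counts := by
    have h := packed_eq_encB base W lines (List.replicate W 0) (by simp)
    rw [encB_replicate_zero] at h
    rw [h, hcounts]
  -- the divmod loop recovers gamma as the little-endian value of the reversed bit list
  have hextract := extract_digits base t hbpos counts.reverse
    (fun d hd => hbound d (List.mem_reverse.mp hd)) 0 1
  rw [encB_reverse base counts, List.length_reverse, hclen] at hextract
  have hextract' : ((List.range W).foldl (fun (s : Int × Int × Int) (_ : Nat) =>
      ((if PySem.Int.mod s.2.2 base ≥ t then s.1 + s.2.1 else s.1),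
        s.2.1 * 2, PySem.Int.floordiv s.2.2 base)) (0, 1, encB base counts)).1
      = valLE ((counts.map (fun c => if c ≥ t then (1 : Int) else 0)).reverse) := by
    rw [hextract, List.map_reverse]
    simp
  -- A's gamma as a numeric fold
  have hAgamma : binVal (counts.map (fun c => if c ≥ t then '1' else '0')) =
      counts.foldl (fun x c => 2 * x + (if c ≥ t then (1 : Int) else 0)) 0 := by
    unfold binVal
    rw [List.foldl_map]
    apply PySem.List.foldl_congr_mem
    intro a c _
    by_cases hc : c ≥ t
    · rw [if_pos hc, if_pos hc, if_pos (show ('1' : Char) = '1' from rfl)]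
    · rw [if_neg hc, if_neg hc, if_neg (show ¬(('0' : Char) = '1') by decide)]
  have hAeps : binVal (counts.map (fun c => if c ≥ t then '0' else '1')) =
      counts.foldl (fun x c => 2 * x + (if c ≥ t then (0 : Int) else 1)) 0 := by
    unfold binVal
    rw [List.foldl_map]
    apply PySem.List.foldl_congr_mem
    intro a c _
    by_cases hc : c ≥ t
    · rw [if_pos hc, if_pos hc, if_neg (show ¬(('0' : Char) = '1') by decide)]
    · rw [if_neg hc, if_neg hc, if_pos (show ('1' : Char) = '1' from rfl)]
  -- both gammas equal valLE of the reversed bit list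
  have hAg2 : counts.foldl (fun x c => 2 * x + (if c ≥ t then (1 : Int) else 0)) 0
      = valLE ((counts.map (fun c => if c ≥ t then (1 : Int) else 0)).reverse) := by
    rw [show (fun (x : Int) (c : Int) => 2 * x + (if c ≥ t then (1 : Int) else 0))
        = (fun x c => (fun (x : Int) (d : Int) => 2 * x + d) x
            ((fun c => if c ≥ t then (1 : Int) else 0) c)) from rfl,
      ← List.foldl_map, foldl_two_eq_valLE_reverse]
    ring
  -- A's epsilon is the W-bit complement of A's gamma
  have hcomp : ∀ (cs : List Int), ∀ (a a' : Int),
      cs.foldl (fun x c => 2 * x + (if c ≥ t then (1 : Int) else 0)) a +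
        cs.foldl (fun x c => 2 * x + (if c ≥ t then (0 : Int) else 1)) a' =
      2 ^ cs.length * (a + a' + 1) - 1 := by
    intro cs
    induction cs with
    | nil => intro a a'; simp
    | cons c rest ih =>
      intro a a'
      simp only [List.foldl_cons, List.length_cons]
      rw [ih]
      split_ifs <;> ring
  rw [hAgamma, hAeps, hpacked, hextract', ← hAg2]
  have hsum := hcomp counts 0 0
  rw [hclen] at hsum
  have : counts.foldl (fun x c => 2 * x + (if c ≥ t then (0 : Int) else 1)) 0 =
      (2 ^ W : Int) - 1 - counts.foldl (fun x c => 2 * x + (if c ≥ t then (1 : Int) else 0)) 0 := by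
    omega
  rw [this]
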